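-- pv_equiv track=rewrite | github.com/Kulak-Informatica/Python | Oefeningen/Kerstvertier/slingerwoorden.py | slinger
-- ===== SOURCE A (Python) =====
-- def graad(woord):
--     woord_1 = ''
--     woord_2 = ''
--     a = -1
--     graad = 0
--
--     for i in range(len(woord)):
--         woord_1 += woord[i]
--         woord_2 = woord[a] + woord_2
--         a -= 1
--
--         if woord_1 == woord_2 and woord_1 != woord:
--             graad = len(woord_1)
--
--     return graad
--
-- def slinger(woord, aantal):
--     graad_2 = graad(woord)
--     woord_3 = ''
--
--     if aantal == 0:
--         return ''
--
--     elif graad_2 == 0: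
--         output = woord * aantal
--         return output
--
--     else:
--         for b in range(0, graad_2):
--             woord_3 += woord[b]
--         lengte = len(woord) - graad_2
--         output = (woord[:lengte] * (aantal - 1)) + woord
--         return output
-- ===== SOURCE B (Python) =====
-- def slinger(woord, aantal):
--     if aantal == 0:
--         return ''
--     n = len(woord)
--     g = 0
--     for k in range(n - 1, 0, -1):
--         if woord[:k] == woord[n - k:]:
--             g = k
--             break
--     if g == 0:
--         return woord * aantal
--     return woord[:n - g] * (aantal - 1) + woord
-- ===== Notes on version B (the rewrite author's own statement) =====
-- stated objective: simpler
-- what changed: B replaces A's ascending border search, which rebuilds the prefix and suffix strings character by character (and via a negative running index) while recording the last match, by a short descending scan that returns the first k from n-1 down with woord[:k] == woord[n-k:], and drops A's dead woord_3-building loop; the output is then assembled by the same overlap formula.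
import Mathlib
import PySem

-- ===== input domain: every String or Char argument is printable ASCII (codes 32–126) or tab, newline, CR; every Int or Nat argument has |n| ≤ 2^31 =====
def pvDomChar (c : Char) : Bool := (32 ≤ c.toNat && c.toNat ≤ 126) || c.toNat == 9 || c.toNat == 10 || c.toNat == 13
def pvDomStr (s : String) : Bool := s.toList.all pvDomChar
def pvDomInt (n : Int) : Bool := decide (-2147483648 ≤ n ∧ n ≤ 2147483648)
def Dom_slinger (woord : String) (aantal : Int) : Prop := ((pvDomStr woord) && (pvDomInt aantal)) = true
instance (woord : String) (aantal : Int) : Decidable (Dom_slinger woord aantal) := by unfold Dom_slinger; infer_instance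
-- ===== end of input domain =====

-- B replaces A's ascending char-by-char border search (building both strings incrementally and
-- keeping the last match) by a descending first-match scan over slices; objective: simpler.


-- ===== PORT A =====
-- Python's `str * int` (used by both sources): value-exact to PySem.List.pyRepeat; the empty-string
-- case short-circuits so evaluation is feasible like CPython's (`'' * n` is instant for any n).
def strMul (xs : List Char) (n : Int) : List Char :=
  if xs = [] then [] else (List.replicate n.toNat xs).flatten

-- A's helper `graad`: loop over i, growing woord_1 (prefix, appended on the right, woord[i]) and
-- woord_2 (suffix, prepended via the negative index a), recording the last matching length.
-- woord[i] / woord[a] are always in range here, so `.getD []` never supplies the default.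
def graadA (woord : List Char) : Int :=
  ((PySem.List.pyRange 0 (woord.length : Int)).foldl
    (fun (s : List Char × List Char × Int × Int) i =>
      let woord_1 := s.1 ++ ((PySem.List.pyGet? woord i).map (fun c => [c])).getD []
      let woord_2 := ((PySem.List.pyGet? woord s.2.2.1).map (fun c => [c])).getD [] ++ s.2.1
      let a := s.2.2.1 - 1
      let g := if woord_1 = woord_2 ∧ woord_1 ≠ woord then (woord_1.length : Int) else s.2.2.2
      (woord_1, woord_2, a, g))
    ([], [], -1, 0)).2.2.2

def slinger (woord : String) (aantal : Int) : String :=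
  let w := woord.toList
  let graad_2 := graadA w
  if aantal = 0 then ""
  else if graad_2 = 0 then String.ofList (strMul w aantal)
  else
    -- A builds woord_3 character by character but never uses it; kept for faithfulness.
    let _woord_3 := (PySem.List.pyRange 0 graad_2).foldl
      (fun (acc : List Char) b => acc ++ ((PySem.List.pyGet? w b).map (fun c => [c])).getD []) []
    let lengte := (w.length : Int) - graad_2
    String.ofList (strMul (PySem.List.slice w none (some lengte)) (aantal - 1) ++ w)

-- ===== PORT B =====
-- B's descending scan: first k from n-1 down to 1 with woord[:k] == woord[n-k:] (here both slice
-- bounds are in 0..n, where Python's slices are exactly take/drop), else 0.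
def borderDesc (woord : List Char) : Nat → Nat
  | 0 => 0
  | k + 1 =>
    if woord.take (k + 1) = woord.drop (woord.length - (k + 1)) then k + 1
    else borderDesc woord k

def slinger_alt (woord : String) (aantal : Int) : String :=
  if aantal = 0 then ""
  else
    let w := woord.toList
    let n := w.length
    let g := borderDesc w (n - 1)
    if g = 0 then String.ofList (strMul w aantal)
    else String.ofList (strMul (w.take (n - g)) (aantal - 1) ++ w)

-- ===== PRECONDITION & SPEC =====
def Spec_slinger (woord : String) (aantal : Int) (out : String) : Prop := out = slinger_alt woord aantal
instance (woord : String) (aantal : Int) (out : String) : Decidable (Spec_slinger woord aantal out) := by unfold Spec_slinger; infer_instance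

-- ===== CLAIM (what is proved, stated in full; the proofs are below) =====
def Claim_equal_slinger : Prop := ∀ (woord : String) (aantal : Int), Dom_slinger woord aantal → Spec_slinger woord aantal (slinger woord aantal)

-- ===== LEMMAS AND PROOFS =====

-- Ascending last-match accumulator mirroring A's `graad` variable.
def lastG (w : List Char) : Nat → Int
  | 0 => 0
  | m + 1 =>
    if w.take (m + 1) = w.drop (w.length - (m + 1)) ∧ w.take (m + 1) ≠ w then ((m + 1 : Nat) : Int)
    else lastG w m

-- The loop invariant of A's `graad` loop after m iterations.
theorem graadA_invariant (w : List Char) (m : Nat) (hm : m ≤ w.length) :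
    ((PySem.List.pyRange 0 (m : Int)).foldl
      (fun (s : List Char × List Char × Int × Int) i =>
        let woord_1 := s.1 ++ ((PySem.List.pyGet? w i).map (fun c => [c])).getD []
        let woord_2 := ((PySem.List.pyGet? w s.2.2.1).map (fun c => [c])).getD [] ++ s.2.1
        let a := s.2.2.1 - 1
        let g := if woord_1 = woord_2 ∧ woord_1 ≠ w then (woord_1.length : Int) else s.2.2.2
        (woord_1, woord_2, a, g))
      ([], [], -1, 0))
    = (w.take m, w.drop (w.length - m), -((m : Int) + 1), lastG w m) := by
  induction m with
  | zero => simp [PySem.List.pyRange, lastG]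
  | succ m ih =>
    have hm' : m ≤ w.length := Nat.le_of_succ_le hm
    have hrange : PySem.List.pyRange 0 ((m + 1 : Nat) : Int)
        = PySem.List.pyRange 0 (m : Int) ++ PySem.List.pyRange (m : Int) ((m + 1 : Nat) : Int) := by
      exact PySem.List.pyRange_one_append 0 (m : Int) ((m + 1 : Nat) : Int) (by positivity) (by push_cast; omega)
    have hsing : PySem.List.pyRange (m : Int) ((m + 1 : Nat) : Int) = [(m : Int)] := by
      rw [PySem.List.pyRange_one_cons (by push_cast; omega)]
      have : ((m : Int) + 1) = ((m + 1 : Nat) : Int) := by push_cast; ring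
      rw [this]
      simp [PySem.List.pyRange]
    rw [hrange, hsing, List.foldl_append, ih hm']
    have hmlt : m < w.length := hm
    -- woord[i] at i = m
    have hget1 : PySem.List.pyGet? w (m : Int) = some w[m] := by
      rw [PySem.List.pyGet?_natCast]
      exact List.getElem?_eq_getElem hmlt
    -- woord[a] at a = -(m+1): negative index, Python resolves it to w.length - (m+1)
    have hidx : w.length - (m + 1) < w.length := by omega
    have hget2 : PySem.List.pyGet? w (-((m : Int) + 1)) = some w[w.length - (m + 1)] := by
      simp only [PySem.List.pyGet?, PySem.List.pyIdx?]
      rw [if_neg (by omega : ¬ (0 ≤ -((m : Int) + 1))),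
        if_pos (by omega : -(w.length : Int) ≤ -((m : Int) + 1))]
      have h3 : (- -((m : Int) + 1)).toNat = m + 1 := by omega
      rw [h3]
      simp [List.getElem?_eq_getElem hidx]
    simp only [List.foldl_cons, List.foldl_nil, hget1, hget2]
    have htake : w.take m ++ [w[m]] = w.take (m + 1) := by
      rw [List.take_add_one]
      simp [List.getElem?_eq_getElem hmlt]
    have hdrop : [w[w.length - (m + 1)]] ++ w.drop (w.length - m) = w.drop (w.length - (m + 1)) := by
      rw [List.singleton_append, List.drop_eq_getElem_cons hidx]
      have he : w.length - (m + 1) + 1 = w.length - m := by omega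
      rw [he]
    simp only [Option.map_some, Option.getD_some]
    rw [htake]
    refine Prod.ext rfl (Prod.ext ?_ (Prod.ext ?_ ?_)) <;> simp only
    · exact hdrop
    · push_cast; ring
    · rw [hdrop, lastG]
      split_ifs with h
      · have : (w.take (m + 1)).length = m + 1 := by
          simp [List.length_take, Nat.min_eq_left hm]
        rw [this]
      · rfl

theorem graadA_eq_lastG (w : List Char) : graadA w = lastG w w.length := by
  unfold graadA
  rw [graadA_invariant w w.length le_rfl]

-- The last iteration never updates graad: woord_1 = woord there.
theorem lastG_length (w : List Char) (n : Nat) (hn : w.length = n + 1) :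
    lastG w w.length = lastG w n := by
  rw [hn, lastG]
  have : w.take (n + 1) = w := by rw [← hn]; exact List.take_length
  simp [this]

-- Below the full length the ≠-side condition is automatic, and ascending-last = descending-first.
theorem lastG_eq_borderDesc (w : List Char) (k : Nat) (hk : k < w.length) :
    lastG w k = (borderDesc w k : Int) := by
  induction k with
  | zero => simp [lastG, borderDesc]
  | succ m ih =>
    rw [lastG, borderDesc]
    have hne : w.take (m + 1) ≠ w := by
      intro h
      have := congrArg List.length h
      rw [List.length_take] at this
      omega
    simp only [and_iff_left hne]
    split_ifs with h
    · rfl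
    · exact ih (by omega)

theorem graadA_eq_border (w : List Char) : graadA w = (borderDesc w (w.length - 1) : Int) := by
  rw [graadA_eq_lastG]
  rcases Nat.eq_zero_or_pos w.length with h | h
  · rw [h]; rfl
  · obtain ⟨n, hn⟩ : ∃ n, w.length = n + 1 := ⟨w.length - 1, by omega⟩
    rw [lastG_length w n hn, hn]
    simp only [Nat.add_sub_cancel]
    exact lastG_eq_borderDesc w n (by omega)

theorem borderDesc_le (w : List Char) (k : Nat) : borderDesc w k ≤ k := by
  induction k with
  | zero => simp [borderDesc]
  | succ m ih =>
    rw [borderDesc]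
    split_ifs
    · exact le_rfl
    · exact Nat.le_succ_of_le ih

-- ===== VERDICT (by name: the statement is the Claim_ definition above) =====
theorem slinger_spec : Claim_equal_slinger := by
  intro woord aantal _
  unfold Spec_slinger slinger slinger_alt
  simp only [graadA_eq_border]
  by_cases h0 : aantal = 0
  · simp [h0]
  · simp only [if_neg h0]
    set w := woord.toList with hw
    set g := borderDesc w (w.length - 1) with hg
    by_cases hz : (g : Int) = 0
    · have : g = 0 := by exact_mod_cast hz
      simp [this]
    · have hgz : ¬ g = 0 := by intro h; exact hz (by exact_mod_cast h)
      simp only [if_neg hz, if_neg hgz]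
      have hle : g ≤ w.length - 1 := borderDesc_le w (w.length - 1)
      have hslice : PySem.List.slice w none (some ((w.length : Int) - (g : Int))) = w.take (w.length - g) := by
        rw [PySem.List.slice_to w (by omega)]
        congr 1
        omega
      rw [hslice]
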